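-- pv_equiv track=rewrite | github.com/L1NNA/sem-seg | data_loader/seq_loader.py | _prune_tokens
-- ===== SOURCE A (Python) =====
-- def _prune_tokens(tokens, seq_token_id):
--     result = []
--     prev = None
--     for tk in tokens:
--         if tk == seq_token_id and \
--          (prev is None or prev == tk):
--             continue
--         result.append(tk)
--         prev = tk
--     if result[-1] != seq_token_id:
--         result.append(seq_token_id)
--     return result
-- ===== SOURCE B (Python) =====
-- def _prune_tokens(tokens, seq_token_id):
--     result = []
--     i = 0
--     n = len(tokens)
--     while i < n:
--         x = tokens[i]
--         j = i
--         while j < n and tokens[j] == x: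
--             j += 1
--         if x != seq_token_id:
--             result.extend(tokens[i:j])
--         elif result:
--             result.append(x)
--         i = j
--     if result[-1] != seq_token_id:
--         result.append(seq_token_id)
--     return result
-- ===== Notes on version B (the rewrite author's own statement) =====
-- stated objective: alternative
-- what changed: B scans the input as maximal runs of equal tokens (a groupby-style two-level scan) and decides per run -- copy a non-separator run whole, emit at most one separator for a separator run when output is non-empty -- instead of A's per-token loop with a prev variable.
import Mathlib
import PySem

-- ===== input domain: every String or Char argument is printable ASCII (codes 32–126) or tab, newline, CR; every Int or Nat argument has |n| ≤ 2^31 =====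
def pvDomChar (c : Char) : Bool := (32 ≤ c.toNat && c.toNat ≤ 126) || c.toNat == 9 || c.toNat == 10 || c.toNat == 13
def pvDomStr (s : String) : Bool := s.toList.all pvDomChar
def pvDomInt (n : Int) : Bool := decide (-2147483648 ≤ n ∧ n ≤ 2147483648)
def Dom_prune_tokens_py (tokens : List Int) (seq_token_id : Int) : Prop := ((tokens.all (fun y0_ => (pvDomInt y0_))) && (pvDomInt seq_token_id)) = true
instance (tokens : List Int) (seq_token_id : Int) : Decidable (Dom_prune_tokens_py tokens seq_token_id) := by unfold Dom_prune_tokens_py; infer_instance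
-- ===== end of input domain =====

-- B replaces A's per-token loop with a prev variable by a run-based (groupby-style) scan over
-- maximal runs of equal tokens; same O(n) cost, different decomposition. Equivalence is on the
-- return value; neither program mutates its arguments.

-- ===== PORT A =====
-- A's loop state: (result, prev); prev is Option Int (None at the start).
def pvStepA (seq_token_id : Int) (st : List Int × Option Int) (tk : Int) : List Int × Option Int :=
  if tk = seq_token_id ∧ (st.2 = none ∨ st.2 = some tk) then st
  else (st.1 ++ [tk], some tk)

def prune_tokens_py (tokens : List Int) (seq_token_id : Int) : List Int :=
  let st := tokens.foldl (pvStepA seq_token_id) ([], none)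
  let result := st.1
  -- result[-1]: Python raises IndexError on empty result; that case is excluded by Pre_.
  match result.getLast? with
  | none => result
  | some x => if x ≠ seq_token_id then result ++ [seq_token_id] else result

-- ===== PORT B =====
-- maximal runs of equal elements, front to back (the inner while loop of Source B)
def pvRuns : List Int → List (List Int)
  | [] => []
  | x :: xs =>
    (x :: xs.takeWhile (fun y => y == x)) :: pvRuns (xs.dropWhile (fun y => y == x))
  termination_by l => l.length
  decreasing_by
    simp only [List.length_cons]
    have := List.length_dropWhile_le (p := fun y => y == x) (l := xs)
    omega

def pvStepB (seq_token_id : Int) (res : List Int) (g : List Int) : List Int :=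
  if g.head? = some seq_token_id then (if res = [] then res else res ++ [seq_token_id])
  else res ++ g

def prune_tokens_py_alt (tokens : List Int) (seq_token_id : Int) : List Int :=
  let result := (pvRuns tokens).foldl (pvStepB seq_token_id) []
  match result.getLast? with
  | none => result
  | some x => if x ≠ seq_token_id then result ++ [seq_token_id] else result

-- ===== PRECONDITION & SPEC =====
-- Pre_ excludes exactly the inputs with no non-separator token (empty or all-separator lists),
-- on which A (and B alike) raises IndexError at result[-1].
def Pre_prune_tokens_py (tokens : List Int) (seq_token_id : Int) : Prop :=
  ∃ t ∈ tokens, t ≠ seq_token_id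
instance (tokens : List Int) (seq_token_id : Int) : Decidable (Pre_prune_tokens_py tokens seq_token_id) := by unfold Pre_prune_tokens_py; infer_instance
def pvWitness_prune_tokens_py : List Int × Int := ([0, 7, 7, 3], 7)

def Spec_prune_tokens_py (tokens : List Int) (seq_token_id : Int) (out : List Int) : Prop := out = prune_tokens_py_alt tokens seq_token_id
instance (tokens : List Int) (seq_token_id : Int) (out : List Int) : Decidable (Spec_prune_tokens_py tokens seq_token_id out) := by unfold Spec_prune_tokens_py; infer_instance

-- ===== CLAIM (what is proved, stated in full; the proofs are below) =====
def Claim_equal_prune_tokens_py : Prop := ∀ (tokens : List Int) (seq_token_id : Int), Dom_prune_tokens_py tokens seq_token_id → Pre_prune_tokens_py tokens seq_token_id → Spec_prune_tokens_py tokens seq_token_id (prune_tokens_py tokens seq_token_id)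

-- ===== LEMMAS AND PROOFS =====

-- A's loop re-expressed over result alone (prev is determined by result's last element)
def pvStep (seq_token_id : Int) (res : List Int) (tk : Int) : List Int :=
  if tk = seq_token_id ∧ (res = [] ∨ res.getLast? = some seq_token_id) then res
  else res ++ [tk]

theorem pvA_state (seq_token_id : Int) (tokens : List Int) : ∀ (res : List Int),
    tokens.foldl (pvStepA seq_token_id) (res, res.getLast?) =
      (tokens.foldl (pvStep seq_token_id) res,
       (tokens.foldl (pvStep seq_token_id) res).getLast?) := by
  induction tokens with
  | nil => intro res; simp
  | cons tk ts ih =>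
    intro res
    simp only [List.foldl_cons]
    have hA : pvStepA seq_token_id (res, res.getLast?) tk =
        (pvStep seq_token_id res tk, (pvStep seq_token_id res tk).getLast?) := by
      unfold pvStepA pvStep
      by_cases h1 : tk = seq_token_id ∧ (res = [] ∨ res.getLast? = some seq_token_id)
      · have hcond : tk = seq_token_id ∧ (res.getLast? = none ∨ res.getLast? = some tk) := by
          refine ⟨h1.1, ?_⟩
          rcases h1.2 with h | h
          · left; simp [h]
          · right; rw [h, h1.1]
        rw [if_pos hcond, if_pos h1]
      · have hcond : ¬ (tk = seq_token_id ∧ (res.getLast? = none ∨ res.getLast? = some tk)) := by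
          intro hc
          refine h1 ⟨hc.1, ?_⟩
          rcases hc.2 with h | h
          · left; exact List.getLast?_eq_none_iff.mp h
          · right; rw [h, hc.1]
        rw [if_neg hcond, if_neg h1]
        simp
    rw [hA, ih]

theorem pvRun_nonsep (seq_token_id : Int) (l : List Int)
    (h : ∀ y ∈ l, y ≠ seq_token_id) : ∀ res, l.foldl (pvStep seq_token_id) res = res ++ l := by
  induction l with
  | nil => simp
  | cons x xs ih =>
    intro res
    have hx : x ≠ seq_token_id := h x (by simp)
    simp only [List.foldl_cons, pvStep]
    rw [if_neg (fun hc => hx hc.1)]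
    rw [ih (fun y hy => h y (by simp [hy]))]
    simp

theorem pvRun_sep_skip (seq_token_id : Int) (l : List Int)
    (h : ∀ y ∈ l, y = seq_token_id) : ∀ res, (res = [] ∨ res.getLast? = some seq_token_id) →
    l.foldl (pvStep seq_token_id) res = res := by
  induction l with
  | nil => intro res _; simp
  | cons x xs ih =>
    intro res hres
    have hx := h x (by simp)
    simp only [List.foldl_cons, pvStep]
    rw [if_pos ⟨hx, hres⟩]
    exact ih (fun y hy => h y (by simp [hy])) res hres

theorem pvRun_sep (seq_token_id x : Int) (xs : List Int)
    (h : ∀ y ∈ x :: xs, y = seq_token_id) : ∀ res, res ≠ [] → res.getLast? ≠ some seq_token_id →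
    (x :: xs).foldl (pvStep seq_token_id) res = res ++ [seq_token_id] := by
  intro res h1 h2
  have hx := h x (by simp)
  simp only [List.foldl_cons, pvStep]
  rw [if_neg (fun hc => by rcases hc.2 with hc2 | hc2 <;> [exact h1 hc2; exact h2 hc2])]
  rw [pvRun_sep_skip seq_token_id xs (fun y hy => h y (by simp [hy]))]
  · rw [hx]
  · right; simp [hx]

theorem pv_mem_takeWhile {x y : Int} {xs : List Int}
    (hy : y ∈ xs.takeWhile (fun z => z == x)) : y = x := by
  have := List.mem_takeWhile_imp hy
  simpa using this

-- main induction: A's fold over tokens = B's fold over runs, provided result does not end in the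
-- separator whenever tokens begins with it
theorem pv_main (seq_token_id : Int) : ∀ (tokens res : List Int),
    (tokens.head? = some seq_token_id → res = [] ∨ res.getLast? ≠ some seq_token_id) →
    tokens.foldl (pvStep seq_token_id) res = (pvRuns tokens).foldl (pvStepB seq_token_id) res := by
  intro tokens
  induction tokens using pvRuns.induct with
  | case1 => intro res _; simp [pvRuns]
  | case2 x xs ih =>
    intro res hres
    rw [pvRuns]
    have hsplit : x :: xs = (x :: xs.takeWhile (fun z => z == x)) ++ xs.dropWhile (fun z => z == x) := by
      simp [List.takeWhile_append_dropWhile]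
    have hdrophead : ∀ c, (xs.dropWhile (fun z => z == x)).head? = some c → c ≠ x := by
      intro c hc hcx
      have hd := List.head?_dropWhile_not (fun z => z == x) xs
      rw [hc] at hd
      simp [hcx] at hd
    rw [hsplit, List.foldl_append]
    conv_rhs => rw [List.foldl_cons]
    by_cases hx : x = seq_token_id
    · -- separator run
      have hall : ∀ y ∈ x :: xs.takeWhile (fun z => z == x), y = seq_token_id := by
        intro y hy
        rcases List.mem_cons.mp hy with h | h
        · rw [h, hx]
        · rw [pv_mem_takeWhile h, hx]
      have hB : pvStepB seq_token_id res (x :: xs.takeWhile (fun z => z == x)) =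
          (if res = [] then res else res ++ [seq_token_id]) := by
        simp [pvStepB, hx]
      rw [hB]
      by_cases hre : res = []
      · rw [pvRun_sep_skip seq_token_id _ hall res (Or.inl hre)]
        rw [if_pos hre]
        apply ih
        intro hh
        exact ((hdrophead _ hh) hx.symm).elim
      · have hlast : res.getLast? ≠ some seq_token_id := by
          rcases hres (by simp [hx]) with h | h
          · exact absurd h hre
          · exact h
        rw [pvRun_sep seq_token_id x _ hall res hre hlast]
        rw [if_neg hre]
        apply ih
        intro hh
        exact ((hdrophead _ hh) hx.symm).elim
    · -- non-separator run
      have hall : ∀ y ∈ x :: xs.takeWhile (fun z => z == x), y ≠ seq_token_id := by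
        intro y hy
        rcases List.mem_cons.mp hy with h | h
        · rw [h]; exact hx
        · rw [pv_mem_takeWhile h]; exact hx
      have hB : pvStepB seq_token_id res (x :: xs.takeWhile (fun z => z == x)) =
          res ++ (x :: xs.takeWhile (fun z => z == x)) := by
        simp only [pvStepB, List.head?_cons]
        rw [if_neg (by simp [hx])]
      rw [pvRun_nonsep seq_token_id _ hall, hB]
      apply ih
      intro _
      right
      intro hcon
      have hmem : seq_token_id ∈ res ++ (x :: xs.takeWhile (fun z => z == x)) :=
        List.mem_of_getLast? hcon
      rw [List.getLast?_append] at hcon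
      have hne : (x :: xs.takeWhile (fun z => z == x)).getLast? = some seq_token_id := by
        rcases hlg : (x :: xs.takeWhile (fun z => z == x)).getLast? with _ | c
        · simp at hlg
        · rw [hlg] at hcon; simpa using hcon
      exact hall _ (List.mem_of_getLast? hne) rfl

-- ===== VERDICT (by name: the statement is the Claim_ definition above) =====
theorem prune_tokens_py_spec : Claim_equal_prune_tokens_py := by
  intro tokens seq_token_id _ _
  unfold Spec_prune_tokens_py prune_tokens_py prune_tokens_py_alt
  have h1 : tokens.foldl (pvStepA seq_token_id) ([], none) =
      (tokens.foldl (pvStep seq_token_id) [],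
       (tokens.foldl (pvStep seq_token_id) []).getLast?) := by
    have := pvA_state seq_token_id tokens []
    simpa using this
  have h2 := pv_main seq_token_id tokens [] (fun _ => Or.inl rfl)
  simp only [h1, h2]
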